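-- pv_equiv track=rewrite | github.com/lsst-sqre/sasquatch | src/sasquatch/tags.py | _extract_measurement_and_tag_keys
-- ===== SOURCE A (Python) =====
-- def _unescape(value: str) -> str:
--     """Unescape line protocol identifier content."""
--     result: list[str] = []
--     escaped = False
--
--     for char in value:
--         if escaped:
--             result.append(char)
--             escaped = False
--             continue
--         if char == "\\":
--             escaped = True
--             continue
--         result.append(char)
--
--     if escaped:
--         result.append("\\")
--
--     return "".join(result)
--
-- def _unescape_if_needed(value: str) -> str:
--     """Unescape a value only when it contains escapes."""
--     return _unescape(value) if "\\" in value else value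
--
-- def _extract_measurement_and_tag_keys(  # noqa: C901, PLR0912, PLR0915
--     line: str,
-- ) -> tuple[str, set[str]] | None:
--     """Extract a measurement name and tag keys with one pass over the line."""
--     stripped_line = line.lstrip()
--     if not stripped_line or stripped_line.startswith("#"):
--         return None
--
--     measurement_chars: list[str] = []
--     tag_keys: set[str] = set()
--     tag_key_chars: list[str] = []
--     escaped = False
--     in_tag_key = False
--     in_tag_value = False
--
--     for char in line:
--         if escaped:
--             if in_tag_key:
--                 tag_key_chars.append(char)
--             elif not in_tag_value:
--                 measurement_chars.append(char)
--             escaped = False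
--             continue
--
--         if char == "\\":
--             escaped = True
--             if in_tag_key:
--                 tag_key_chars.append(char)
--             elif not in_tag_value:
--                 measurement_chars.append(char)
--             continue
--
--         if in_tag_value:
--             if char == ",":
--                 in_tag_value = False
--                 in_tag_key = True
--                 tag_key_chars = []
--                 continue
--             if char == " ":
--                 break
--             continue
--
--         if in_tag_key:
--             if char == "=":
--                 tag_keys.add(_unescape_if_needed("".join(tag_key_chars)))
--                 in_tag_key = False
--                 in_tag_value = True
--                 continue
--             if char == ",":
--                 tag_key_chars = []
--                 continue
--             if char == " ":
--                 break
--             tag_key_chars.append(char)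
--             continue
--
--         if char == ",":
--             in_tag_key = True
--             continue
--         if char == " ":
--             break
--         measurement_chars.append(char)
--
--     if not measurement_chars:
--         return None
--
--     measurement = _unescape_if_needed("".join(measurement_chars))
--     return measurement, tag_keys
-- ===== SOURCE B (Python) =====
-- def _unescape(value: str) -> str:
--     """Unescape line protocol identifier content."""
--     result: list[str] = []
--     escaped = False
--
--     for char in value:
--         if escaped:
--             result.append(char)
--             escaped = False
--             continue
--         if char == "\\":
--             escaped = True
--             continue
--         result.append(char)
--
--     if escaped:
--         result.append("\\")
--
--     return "".join(result)
--
--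
-- def _unescape_if_needed(value: str) -> str:
--     """Unescape a value only when it contains escapes."""
--     return _unescape(value) if "\\" in value else value
--
--
-- def _split_unescaped(s: str, delim: str) -> list[str]:
--     """Split s on unescaped occurrences of delim (a backslash escapes the next char)."""
--     parts: list[str] = []
--     cur: list[str] = []
--     i = 0
--     n = len(s)
--     while i < n:
--         c = s[i]
--         if c == "\\":
--             cur.append(c)
--             if i + 1 < n:
--                 cur.append(s[i + 1])
--             i += 2
--             continue
--         if c == delim:
--             parts.append("".join(cur))
--             cur = []
--         else:
--             cur.append(c)
--         i += 1
--     parts.append("".join(cur))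
--     return parts
--
--
-- def _extract_measurement_and_tag_keys(line: str) -> tuple[str, set[str]] | None:
--     """Extract a measurement name and tag keys by splitting on unescaped delimiters."""
--     stripped_line = line.lstrip()
--     if not stripped_line or stripped_line.startswith("#"):
--         return None
--
--     head = _split_unescaped(line, " ")[0]
--     segments = _split_unescaped(head, ",")
--     if not segments[0]:
--         return None
--
--     measurement = _unescape_if_needed(segments[0])
--     tag_keys: set[str] = set()
--     for segment in segments[1:]:
--         parts = _split_unescaped(segment, "=")
--         if len(parts) > 1:
--             tag_keys.add(_unescape_if_needed(parts[0]))
--     return measurement, tag_keys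
-- ===== Notes on version B (the rewrite author's own statement) =====
-- stated objective: simpler
-- what changed: Replaced the six-variable single-pass state machine with a three-stage decomposition: cut the head at the first unescaped space, split it on unescaped commas, and take each remaining segment's prefix before its first unescaped key-value separator, via one reusable backslash-aware split helper.
import Mathlib
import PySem

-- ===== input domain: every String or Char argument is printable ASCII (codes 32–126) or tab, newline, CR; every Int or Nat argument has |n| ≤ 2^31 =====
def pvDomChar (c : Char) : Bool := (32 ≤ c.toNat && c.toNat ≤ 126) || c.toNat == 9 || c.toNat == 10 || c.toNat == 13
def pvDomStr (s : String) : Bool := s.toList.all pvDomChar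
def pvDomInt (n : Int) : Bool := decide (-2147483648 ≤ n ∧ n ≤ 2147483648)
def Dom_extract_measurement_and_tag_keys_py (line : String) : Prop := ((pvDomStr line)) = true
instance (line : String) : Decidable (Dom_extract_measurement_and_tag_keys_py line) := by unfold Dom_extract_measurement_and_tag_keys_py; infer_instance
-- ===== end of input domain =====

-- B replaces A's six-variable one-pass state machine by a three-stage decomposition
-- (cut head at first unescaped space, split on unescaped commas, take each tag
-- segment's prefix before its first unescaped key-value separator); objective: simpler, same cost.

-- shared helpers (both Pythons use the same _unescape/_unescape_if_needed)
def unescape (value : String) : String :=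
  let st := value.toList.foldl (fun (acc : List Char × Bool) char =>
    if acc.2 then (acc.1 ++ [char], false)
    else if char = '\\' then (acc.1, true)
    else (acc.1 ++ [char], false)) ([], false)
  String.mk (if st.2 then st.1 ++ ['\\'] else st.1)

def unescapeIfNeeded (value : String) : String :=
  if PySem.Str.isIn "\\" value then unescape value else value

-- ===== PORT A =====
-- the single for-loop of A, as structural recursion over the same state
-- (measurement_chars, tag_keys, tag_key_chars, escaped, in_tag_key, in_tag_value);
-- a `break` returns the current (measurement_chars, tag_keys)
def aLoop (cs : List Char) (meas : List Char) (keys : PySem.Set String)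
    (tk : List Char) (escaped inKey inVal : Bool) : List Char × PySem.Set String :=
  match cs with
  | [] => (meas, keys)
  | char :: rest =>
    if escaped then
      if inKey then aLoop rest meas keys (tk ++ [char]) false inKey inVal
      else if inVal then aLoop rest meas keys tk false inKey inVal
      else aLoop rest (meas ++ [char]) keys tk false inKey inVal
    else if char = '\\' then
      if inKey then aLoop rest meas keys (tk ++ [char]) true inKey inVal
      else if inVal then aLoop rest meas keys tk true inKey inVal
      else aLoop rest (meas ++ [char]) keys tk true inKey inVal
    else if inVal then
      if char = ',' then aLoop rest meas keys [] false true false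
      else if char = ' ' then (meas, keys)
      else aLoop rest meas keys tk false false true
    else if inKey then
      if char = '=' then aLoop rest meas (PySem.Set.add keys (unescapeIfNeeded (String.mk tk))) tk false false true
      else if char = ',' then aLoop rest meas keys [] false true false
      else if char = ' ' then (meas, keys)
      else aLoop rest meas keys (tk ++ [char]) false true false
    else
      if char = ',' then aLoop rest meas keys tk false true false
      else if char = ' ' then (meas, keys)
      else aLoop rest (meas ++ [char]) keys tk false false false

def extract_measurement_and_tag_keys_py (line : String) : Option (String × List String) :=
  let stripped := PySem.Str.lstrip line
  if stripped = "" || PySem.Str.startswith stripped "#" then none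
  else
    let r := aLoop line.toList [] PySem.Set.empty [] false false false
    if r.1 = [] then none
    else some (unescapeIfNeeded (String.mk r.1), r.2)

-- ===== PORT B =====
-- _split_unescaped's while-loop: the i+=2 escape step consumes two chars
def splitUnescapedGo (delim : Char) (s : List Char) (cur : List Char)
    (parts : List (List Char)) : List (List Char) :=
  match s with
  | [] => parts ++ [cur]
  | '\\' :: [] => parts ++ [cur ++ ['\\']]
  | '\\' :: d :: rest => splitUnescapedGo delim rest (cur ++ ['\\', d]) parts
  | c :: rest =>
      if c = delim then splitUnescapedGo delim rest [] (parts ++ [cur])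
      else splitUnescapedGo delim rest (cur ++ [c]) parts

def splitUnescaped (delim : Char) (s : List Char) : List (List Char) :=
  splitUnescapedGo delim s [] []

def extract_measurement_and_tag_keys_py_alt (line : String) : Option (String × List String) :=
  let stripped := PySem.Str.lstrip line
  if stripped = "" || PySem.Str.startswith stripped "#" then none
  else
    -- _split_unescaped always returns a nonempty list, so Python's [0] is headI here
    let head := (splitUnescaped ' ' line.toList).headI
    let segments := splitUnescaped ',' head
    if segments.headI = [] then none
    else
      some (unescapeIfNeeded (String.mk segments.headI),
        segments.tail.foldl (fun keys segment =>
          let parts := splitUnescaped '=' segment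
          if parts.length > 1 then PySem.Set.add keys (unescapeIfNeeded (String.mk parts.headI))
          else keys) PySem.Set.empty)

-- ===== PRECONDITION & SPEC =====
def Spec_extract_measurement_and_tag_keys_py (line : String) (out : Option (String × List String)) : Prop := out = extract_measurement_and_tag_keys_py_alt line
instance (line : String) (out : Option (String × List String)) : Decidable (Spec_extract_measurement_and_tag_keys_py line out) := by unfold Spec_extract_measurement_and_tag_keys_py; infer_instance

-- ===== CLAIM (what is proved, stated in full; the proofs are below) =====
def Claim_equal_extract_measurement_and_tag_keys_py : Prop := ∀ (line : String), Dom_extract_measurement_and_tag_keys_py line → Spec_extract_measurement_and_tag_keys_py line (extract_measurement_and_tag_keys_py line)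

-- ===== LEMMAS AND PROOFS =====

-- prepend p to the first part of l
def consHd (p : List Char) (l : List (List Char)) : List (List Char) := (p ++ l.headI) :: l.tail

-- accumulator-free form of splitUnescaped
def splitU (delim : Char) : List Char → List (List Char)
  | [] => [[]]
  | '\\' :: [] => [['\\']]
  | '\\' :: d :: rest => consHd ['\\', d] (splitU delim rest)
  | c :: rest => if c = delim then [] :: splitU delim rest else consHd [c] (splitU delim rest)

@[simp] theorem splitU_nil (delim : Char) : splitU delim [] = [[]] := rfl
@[simp] theorem splitU_bs (delim : Char) : splitU delim ['\\'] = [['\\']] := rfl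
@[simp] theorem splitU_bs2 (delim d : Char) (rest : List Char) :
    splitU delim ('\\' :: d :: rest) = consHd ['\\', d] (splitU delim rest) := rfl

theorem splitU_cons (delim c : Char) (rest : List Char) (h : c ≠ '\\') :
    splitU delim (c :: rest) =
      if c = delim then [] :: splitU delim rest else consHd [c] (splitU delim rest) := by
  rw [splitU.eq_def]
  split <;> simp_all

theorem splitUnescapedGo_cons (delim c : Char) (rest cur : List Char)
    (parts : List (List Char)) (h : c ≠ '\\') :
    splitUnescapedGo delim (c :: rest) cur parts =
      if c = delim then splitUnescapedGo delim rest [] (parts ++ [cur])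
      else splitUnescapedGo delim rest (cur ++ [c]) parts := by
  rw [splitUnescapedGo.eq_def]
  split <;> simp_all

theorem splitU_ne_nil (delim : Char) (s : List Char) : splitU delim s ≠ [] := by
  induction s using splitU.induct delim with
  | case1 => simp
  | case2 => simp
  | case3 d rest ih => simp [consHd]
  | case4 rest h1 h2 ih =>
      have hc : delim ≠ '\\' := by
        intro he
        cases rest with
        | nil => exact h1 he rfl
        | cons a t => exact h2 a t he rfl
      rw [splitU_cons _ _ _ hc, if_pos rfl]
      simp
  | case5 c rest h1 h2 hne ih =>
      have hc : c ≠ '\\' := by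
        intro he
        cases rest with
        | nil => exact h1 he rfl
        | cons a t => exact h2 a t he rfl
      rw [splitU_cons _ _ _ hc, if_neg hne]
      simp [consHd]

theorem headI_cons_tail {α : Type} [Inhabited α] (l : List α) (h : l ≠ []) :
    l.headI :: l.tail = l := by
  cases l with
  | nil => exact absurd rfl h
  | cons a t => rfl

theorem consHd_nil (l : List (List Char)) (h : l ≠ []) : consHd [] l = l := by
  simp only [consHd, List.nil_append]; exact headI_cons_tail l h

theorem consHd_consHd (p q : List Char) (l : List (List Char)) :
    consHd p (consHd q l) = consHd (p ++ q) l := by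
  simp [consHd]

theorem splitUnescapedGo_eq (delim : Char) (s : List Char) :
    ∀ cur parts, splitUnescapedGo delim s cur parts = parts ++ consHd cur (splitU delim s) := by
  induction s using splitU.induct delim with
  | case1 => intro cur parts; simp [splitUnescapedGo, consHd]
  | case2 => intro cur parts; simp [splitUnescapedGo, consHd]
  | case3 d rest ih =>
      intro cur parts
      rw [splitUnescapedGo, ih, splitU_bs2, consHd_consHd]
  | case4 rest h1 h2 ih =>
      intro cur parts
      have hc : delim ≠ '\\' := by
        intro he
        cases rest with
        | nil => exact h1 he rfl
        | cons a t => exact h2 a t he rfl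
      rw [splitUnescapedGo_cons _ _ _ _ _ hc, if_pos rfl, ih,
        splitU_cons _ _ _ hc, if_pos rfl]
      simp [consHd]
      exact headI_cons_tail _ (splitU_ne_nil delim rest)
  | case5 c rest h1 h2 hne ih =>
      intro cur parts
      have hc : c ≠ '\\' := by
        intro he
        cases rest with
        | nil => exact h1 he rfl
        | cons a t => exact h2 a t he rfl
      rw [splitUnescapedGo_cons _ _ _ _ _ hc, if_neg hne, ih,
        splitU_cons _ _ _ hc, if_neg hne, consHd_consHd]

theorem splitUnescaped_eq (delim : Char) (s : List Char) :
    splitUnescaped delim s = splitU delim s := by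
  rw [splitUnescaped, splitUnescapedGo_eq, consHd_nil _ (splitU_ne_nil delim s)]
  simp

-- B's per-line segments: comma-split of the head (prefix up to first unescaped space)
def gSegs (cs : List Char) : List (List Char) := splitU ',' ((splitU ' ' cs).headI)

theorem gSegs_nil : gSegs [] = [[]] := rfl
theorem gSegs_bs : gSegs ['\\'] = [['\\']] := rfl
theorem gSegs_bs2 (d : Char) (r : List Char) :
    gSegs ('\\' :: d :: r) = consHd ['\\', d] (gSegs r) := by
  simp only [gSegs, splitU_bs2]
  have hh : (consHd ['\\', d] (splitU ' ' r)).headI = '\\' :: d :: (splitU ' ' r).headI := by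
    simp [consHd]
  rw [hh, splitU_bs2]
theorem gSegs_cons (c : Char) (r : List Char) (h : c ≠ '\\') :
    gSegs (c :: r) = if c = ' ' then [[]] else if c = ',' then [] :: gSegs r
      else consHd [c] (gSegs r) := by
  simp only [gSegs, splitU_cons _ _ _ h]
  by_cases hsp : c = ' '
  · rw [if_pos hsp, if_pos hsp]
    simp
  · rw [if_neg hsp, if_neg hsp]
    have hh : (consHd [c] (splitU ' ' r)).headI = c :: (splitU ' ' r).headI := by
      simp [consHd]
    rw [hh, splitU_cons _ _ _ h]

theorem gSegs_ne_nil (cs : List Char) : gSegs cs ≠ [] := splitU_ne_nil _ _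

-- B's key extraction step on one segment
def keyStep (keys : PySem.Set String) (seg : List Char) : PySem.Set String :=
  if (splitU '=' seg).length > 1 then
    PySem.Set.add keys (unescapeIfNeeded (String.mk (splitU '=' seg).headI))
  else keys

def keysFold (keys : PySem.Set String) (segs : List (List Char)) : PySem.Set String :=
  segs.foldl keyStep keys

@[simp] theorem keysFold_nil (keys : PySem.Set String) : keysFold keys [] = keys := rfl
@[simp] theorem keysFold_cons (keys : PySem.Set String) (s : List Char) (t : List (List Char)) :
    keysFold keys (s :: t) = keysFold (keyStep keys s) t := rfl

-- tk is a clean key prefix: splitting tk ++ x on '=' prepends tk to the first part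
def CleanTk (tk : List Char) : Prop :=
  ∀ x, splitU '=' (tk ++ x) = consHd tk (splitU '=' x)

theorem cleanTk_nil : CleanTk [] := by
  intro x; simp [consHd_nil _ (splitU_ne_nil '=' x)]

theorem cleanTk_snoc (tk : List Char) (c : Char) (h : CleanTk tk) (hc1 : c ≠ '\\')
    (hc2 : c ≠ '=') : CleanTk (tk ++ [c]) := by
  intro x
  have h1 := h (c :: x)
  rw [splitU_cons _ _ _ hc1, if_neg hc2, consHd_consHd] at h1
  simpa using h1

theorem cleanTk_snoc2 (tk : List Char) (d : Char) (h : CleanTk tk) :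
    CleanTk (tk ++ ['\\', d]) := by
  intro x
  have h1 := h ('\\' :: d :: x)
  rw [splitU_bs2, consHd_consHd] at h1
  simpa using h1

theorem cleanTk_single (tk : List Char) (h : CleanTk tk) : splitU '=' tk = [tk] := by
  have h1 := h []
  simpa [consHd] using h1

theorem keyStep_clean (keys : PySem.Set String) (tk : List Char) (h : CleanTk tk) :
    keyStep keys tk = keys := by
  simp [keyStep, cleanTk_single tk h]

theorem keyStep_clean_bs (keys : PySem.Set String) (tk : List Char) (h : CleanTk tk) :
    keyStep keys (tk ++ ['\\']) = keys := by
  have h1 := h ['\\']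
  simp only [splitU_bs, consHd] at h1
  simp [keyStep, h1]

theorem keyStep_eq (keys : PySem.Set String) (tk : List Char) (x : List Char) (h : CleanTk tk) :
    keyStep keys (tk ++ '=' :: x) = PySem.Set.add keys (unescapeIfNeeded (String.mk tk)) := by
  have h1 := h ('=' :: x)
  rw [splitU_cons _ _ _ (by decide), if_pos rfl] at h1
  have hne := splitU_ne_nil '=' x
  simp only [keyStep, h1, consHd, List.headI, List.tail, List.append_nil]
  have hpos : 0 < (splitU '=' x).length := List.length_pos_iff.mpr hne
  have hlt : (tk :: splitU '=' x).length > 1 := by simp [hpos]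
  rw [if_pos hlt]

-- the main invariant: A's loop, started in each of its three modes, computes B's answer
theorem main_inv (n : ℕ) : ∀ (cs : List Char), cs.length ≤ n →
    (∀ meas keys tk, aLoop cs meas keys tk false false true = (meas, keysFold keys (gSegs cs).tail)) ∧
    (∀ meas keys tk, CleanTk tk → aLoop cs meas keys tk false true false =
        (meas, keysFold keys ((tk ++ (gSegs cs).headI) :: (gSegs cs).tail))) ∧
    (∀ meas keys, aLoop cs meas keys [] false false false =
        (meas ++ (gSegs cs).headI, keysFold keys (gSegs cs).tail)) := by
  induction n with
  | zero =>
      intro cs hlen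
      have hnil : cs = [] := List.length_eq_zero_iff.mp (Nat.le_zero.mp hlen)
      subst hnil
      refine ⟨fun meas keys tk => by simp [aLoop, gSegs_nil],
              fun meas keys tk h => by
                simp [aLoop, gSegs_nil, keyStep_clean _ _ h],
              fun meas keys => by simp [aLoop, gSegs_nil]⟩
  | succ n ih =>
      intro cs hlen
      rcases cs with _ | ⟨c, r⟩
      · refine ⟨fun meas keys tk => by simp [aLoop, gSegs_nil],
                fun meas keys tk h => by
                  simp [aLoop, gSegs_nil, keyStep_clean _ _ h],
                fun meas keys => by simp [aLoop, gSegs_nil]⟩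
      · by_cases hbs : c = '\\'
        · subst hbs
          rcases r with _ | ⟨d, r⟩
          · refine ⟨fun meas keys tk => by simp [aLoop, gSegs_bs],
                    fun meas keys tk h => by
                      simp [aLoop, gSegs_bs, consHd, keyStep_clean_bs _ _ h],
                    fun meas keys => by simp [aLoop, gSegs_bs]⟩
          · have hr : r.length ≤ n := by simp at hlen; omega
            obtain ⟨ihV, ihK, ihM⟩ := ih r hr
            refine ⟨fun meas keys tk => ?_, fun meas keys tk h => ?_, fun meas keys => ?_⟩
            · simp only [aLoop, if_pos rfl, Bool.false_eq_true, if_false, if_true]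
              rw [ihV, gSegs_bs2]
              simp [consHd]
            · simp only [aLoop, if_pos rfl, Bool.false_eq_true, if_false, if_true]
              have hx : tk ++ ['\\'] ++ [d] = tk ++ ['\\', d] := by simp
              rw [hx, ihK _ _ _ (cleanTk_snoc2 _ _ h), gSegs_bs2]
              simp [consHd]
            · simp only [aLoop, if_pos rfl, Bool.false_eq_true, if_false, if_true]
              rw [ihM, gSegs_bs2]
              simp [consHd]
        · have hr : r.length ≤ n := by simp at hlen; omega
          obtain ⟨ihV, ihK, ihM⟩ := ih r hr
          refine ⟨fun meas keys tk => ?_, fun meas keys tk h => ?_, fun meas keys => ?_⟩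
          · -- value mode
            rw [gSegs_cons _ _ hbs]
            by_cases hc : c = ','
            · subst hc
              simp only [aLoop, if_neg (by decide : ¬(',' = '\\')), if_pos rfl,
                Bool.false_eq_true, if_false, if_true]
              rw [ihK _ _ _ cleanTk_nil]
              rw [List.nil_append, headI_cons_tail _ (gSegs_ne_nil r)]
              simp
            · by_cases hs : c = ' '
              · subst hs
                simp [aLoop]
              · simp only [aLoop, if_neg hbs, if_neg hc, if_neg hs,
                  Bool.false_eq_true, if_false, if_true]
                rw [ihV]
                simp [hs, hc, consHd]
          · -- key mode
            rw [gSegs_cons _ _ hbs]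
            by_cases he : c = '='
            · subst he
              simp only [aLoop, if_neg (by decide : ¬('=' = '\\')),
                if_neg (by decide : ¬('=' = ',')), if_neg (by decide : ¬('=' = ' ')), if_pos rfl,
                Bool.false_eq_true, if_false, if_true]
              rw [ihV]
              simp [consHd, keyStep_eq _ _ _ h]
            · by_cases hc : c = ','
              · subst hc
                simp only [aLoop, if_neg (by decide : ¬(',' = '\\')),
                  if_neg (by decide : ¬(',' = '=')), if_pos rfl,
                  Bool.false_eq_true, if_false, if_true]
                rw [ihK _ _ _ cleanTk_nil]
                rw [List.nil_append, headI_cons_tail _ (gSegs_ne_nil r)]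
                simp [keyStep_clean _ _ h]
              · by_cases hs : c = ' '
                · subst hs
                  simp [aLoop, keyStep_clean _ _ h]
                · simp only [aLoop, if_neg hbs, if_neg he, if_neg hc, if_neg hs,
                    Bool.false_eq_true, if_false, if_true]
                  rw [ihK _ _ _ (cleanTk_snoc _ _ h hbs he)]
                  simp [hs, hc, consHd]
          · -- measurement mode
            rw [gSegs_cons _ _ hbs]
            by_cases hc : c = ','
            · subst hc
              simp only [aLoop, if_neg (by decide : ¬(',' = '\\')), if_pos rfl,
                Bool.false_eq_true, if_false, if_true]
              rw [ihK _ _ _ cleanTk_nil]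
              rw [List.nil_append, headI_cons_tail _ (gSegs_ne_nil r)]
              simp
            · by_cases hs : c = ' '
              · subst hs
                simp [aLoop]
              · simp only [aLoop, if_neg hbs, if_neg hc, if_neg hs,
                  Bool.false_eq_true, if_false, if_true]
                rw [ihM]
                simp [hs, hc, consHd]

-- ===== VERDICT (by name: the statement is the Claim_ definition above) =====
theorem extract_measurement_and_tag_keys_py_spec : Claim_equal_extract_measurement_and_tag_keys_py := by
  intro line _
  unfold Spec_extract_measurement_and_tag_keys_py
  obtain ⟨-, -, ihM⟩ := main_inv line.toList.length line.toList le_rfl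
  unfold extract_measurement_and_tag_keys_py extract_measurement_and_tag_keys_py_alt
  simp only [splitUnescaped_eq, ihM, List.nil_append]
  simp only [keysFold, keyStep, gSegs]
  rfl
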